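-- pv_equiv track=rewrite | github.com/firedial/til | python/mahjong/yaku.py | isRyanpeko
-- ===== SOURCE A (Python) =====
-- def isRyanpeko(mentsu):
--     # 順子が 4 つあることが前提
--     if len(mentsu['shuntsu']) != 4:
--         return False
--
--     s = set(mentsu['shuntsu'])
--     # 一色四順の場合
--     if len(s) == 1:
--         return True
--
--     # 3 種類以上の順子で構成されている場合
--     if len(s) != 2:
--         return False
--
--     for r in s:
--         if mentsu['shuntsu'].count(r) != 2:
--             return False
--
--     return True
-- ===== SOURCE B (Python) =====
-- def isRyanpeko(mentsu):
--     shuntsu = mentsu['shuntsu']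
--     if len(shuntsu) != 4:
--         return False
--     # Sort the four sequences; two identical pairs (or one quadruple, which A's
--     # issuuushun branch also accepts) iff adjacent pairs match after sorting.
--     t = sorted(shuntsu)
--     return t[0] == t[1] and t[2] == t[3]
-- ===== Notes on version B (the rewrite author's own statement) =====
-- stated objective: simpler
-- what changed: Instead of building the set of distinct sequences and branching on its size (1 -> True, 2 -> check each count==2, else False), B sorts the four sequences once and returns whether the two adjacent pairs of the sorted list match (t[0]==t[1] and t[2]==t[3]).
import Mathlib
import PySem

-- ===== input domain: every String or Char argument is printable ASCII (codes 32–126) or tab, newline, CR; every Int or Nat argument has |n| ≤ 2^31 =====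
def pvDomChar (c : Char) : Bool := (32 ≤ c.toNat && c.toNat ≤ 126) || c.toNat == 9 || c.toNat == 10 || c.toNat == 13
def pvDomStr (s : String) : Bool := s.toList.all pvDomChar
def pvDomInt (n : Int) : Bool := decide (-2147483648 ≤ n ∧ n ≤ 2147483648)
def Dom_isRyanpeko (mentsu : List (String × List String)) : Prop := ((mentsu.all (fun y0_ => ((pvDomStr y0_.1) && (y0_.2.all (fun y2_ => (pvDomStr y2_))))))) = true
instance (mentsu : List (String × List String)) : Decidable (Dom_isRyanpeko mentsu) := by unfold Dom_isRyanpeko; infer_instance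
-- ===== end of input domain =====

-- B sorts once and compares adjacent pairs instead of branching on the set of
-- distinct sequences; equivalence is about the return value (no mutation).

-- ===== PORT A =====
-- A: guard len==4, then branch on the number of distinct sequences (1 → True,
-- 2 → each must occur twice, else → False).
def isRyanpeko (mentsu : List (String × List String)) : Bool :=
  match PySem.Dict.get? (PySem.Dict.mk mentsu) "shuntsu" with
  | none => false   -- KeyError in Python; excluded by Pre_
  | some shuntsu =>
      if shuntsu.length ≠ 4 then false
      else
        let s : PySem.Set String := PySem.Set.ofList shuntsu
        if PySem.Set.len s = 1 then true
        else if PySem.Set.len s ≠ 2 then false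
        else s.all (fun r => PySem.List.count shuntsu r == 2)

-- ===== PORT B =====
-- B: guard len==4, sort, compare the two adjacent pairs of the sorted list.
-- (t[0]..t[3] are in range since the guard fixed the length to 4.)
def isRyanpeko_alt (mentsu : List (String × List String)) : Bool :=
  match PySem.Dict.get? (PySem.Dict.mk mentsu) "shuntsu" with
  | none => false   -- KeyError in Python; excluded by Pre_
  | some shuntsu =>
      if shuntsu.length ≠ 4 then false
      else
        let t := PySem.List.sorted shuntsu (fun x => x) false
        (PySem.List.pyGetD t 0 "" == PySem.List.pyGetD t 1 "")
          && (PySem.List.pyGetD t 2 "" == PySem.List.pyGetD t 3 "")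

-- ===== PRECONDITION & SPEC =====
-- Pre_ excludes exactly the inputs on which A raises KeyError ('shuntsu' key missing).
def Pre_isRyanpeko (mentsu : List (String × List String)) : Prop :=
  (PySem.Dict.get? (PySem.Dict.mk mentsu) "shuntsu").isSome = true
instance (mentsu : List (String × List String)) : Decidable (Pre_isRyanpeko mentsu) := by
  unfold Pre_isRyanpeko; infer_instance
def pvWitness_isRyanpeko : (List (String × List String)) :=
  [("shuntsu", ["123m", "123m", "456p", "456p"])]
def Spec_isRyanpeko (mentsu : List (String × List String)) (out : Bool) : Prop := out = isRyanpeko_alt mentsu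
instance (mentsu : List (String × List String)) (out : Bool) : Decidable (Spec_isRyanpeko mentsu out) := by unfold Spec_isRyanpeko; infer_instance

-- ===== CLAIM (what is proved, stated in full; the proofs are below) =====
def Claim_equal_isRyanpeko : Prop := ∀ (mentsu : List (String × List String)), Dom_isRyanpeko mentsu → Pre_isRyanpeko mentsu → Spec_isRyanpeko mentsu (isRyanpeko mentsu)

-- ===== LEMMAS AND PROOFS =====

-- the distinct-element list of xs is a permutation of xs.dedup
theorem setOfList_perm_dedup (xs : List String) :
    (PySem.Set.ofList xs).Perm xs.dedup := by
  rw [List.perm_ext_iff_of_nodup (PySem.Set.nodup_ofList xs) xs.nodup_dedup]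
  intro a
  rw [PySem.Set.mem_ofList, List.mem_dedup]

theorem core_eq (xs : List String) (hlen : xs.length = 4) :
    (if PySem.Set.len (PySem.Set.ofList xs) = 1 then true
     else if PySem.Set.len (PySem.Set.ofList xs) ≠ 2 then false
     else (PySem.Set.ofList xs).all (fun r => PySem.List.count xs r == 2))
      = ((PySem.List.pyGetD (PySem.List.sorted xs (fun x => x) false) 0 ""
            == PySem.List.pyGetD (PySem.List.sorted xs (fun x => x) false) 1 "")
          && (PySem.List.pyGetD (PySem.List.sorted xs (fun x => x) false) 2 ""
            == PySem.List.pyGetD (PySem.List.sorted xs (fun x => x) false) 3 "")) := by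
  have hperm : (PySem.List.sorted xs (fun x => x) false).Perm xs :=
    PySem.List.sorted_perm xs (fun x => x) false
  have hpw : (PySem.List.sorted xs (fun x => x) false).Pairwise (fun u v => u ≤ v) :=
    PySem.List.sorted_pairwise xs (fun x => x)
  have hlt : (PySem.List.sorted xs (fun x => x) false).length = 4 := by
    rw [hperm.length_eq, hlen]
  obtain ⟨a, b, c, d, ht⟩ :
      ∃ a b c d, PySem.List.sorted xs (fun x => x) false = [a, b, c, d] := by
    generalize PySem.List.sorted xs (fun x => x) false = L at hlt ⊢
    rcases L with _ | ⟨a, L⟩; · simp at hlt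
    rcases L with _ | ⟨b, L⟩; · simp at hlt
    rcases L with _ | ⟨c, L⟩; · simp at hlt
    rcases L with _ | ⟨d, L⟩; · simp at hlt
    rcases L with _ | ⟨e, L⟩
    · exact ⟨a, b, c, d, rfl⟩
    · simp at hlt
  rw [ht] at hperm hpw ⊢
  simp only [List.pairwise_cons, List.mem_cons, List.not_mem_nil] at hpw
  have hab : a ≤ b := hpw.1 b (Or.inl rfl)
  have hbc : b ≤ c := hpw.2.1 c (Or.inl rfl)
  have hcd : c ≤ d := hpw.2.2.1 d (Or.inl rfl)
  have had : a ≤ d := hpw.1 d (Or.inr (Or.inr (Or.inl rfl)))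
  have hget : ∀ (x y z w : String),
      ((PySem.List.pyGetD [x,y,z,w] 0 "" == PySem.List.pyGetD [x,y,z,w] 1 "")
        && (PySem.List.pyGetD [x,y,z,w] 2 "" == PySem.List.pyGetD [x,y,z,w] 3 ""))
        = ((x == y) && (z == w)) := by
    intro x y z w
    simp [pysem]
  have hslen : PySem.Set.len (PySem.Set.ofList xs)
      = ((([a,b,c,d] : List String).dedup.length : Nat) : Int) := by
    have h1 := (setOfList_perm_dedup xs).length_eq
    have h2 := (hperm.dedup).length_eq
    simp [PySem.Set.len, h1, ← h2]
  have hcount : ∀ r : String, PySem.List.count xs r = List.count r ([a,b,c,d] : List String) := by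
    intro r
    rw [PySem.List.count_eq, hperm.count_eq]
  have hmem : ∀ r : String, r ∈ PySem.Set.ofList xs ↔ (r = a ∨ r = b ∨ r = c ∨ r = d) := by
    intro r
    rw [PySem.Set.mem_ofList, ← hperm.mem_iff]
    simp
  rw [hslen]
  by_cases h1 : a = b <;> by_cases h2 : b = c <;> by_cases h3 : c = d
  -- a = b = c = d : one distinct sequence, both sides True
  · subst h1 h2 h3
    have hd : (([a,a,a,a] : List String)).dedup = [a] := by
      simp [List.dedup_cons_of_mem]
    rw [hd]
    simp only [List.length_cons, List.length_nil]
    rw [if_pos (by norm_num), hget]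
    simp
  -- a = b = c ≠ d : two distinct, counts 3/1, both sides False
  · subst h1 h2
    have hne : a ≠ d := fun h => h3 (le_antisymm hcd (h ▸ had))
    have hd : (([a,a,a,d] : List String)).dedup = [a,d] := by
      simp [List.dedup_cons_of_mem, List.dedup_cons_of_notMem, hne]
    rw [hd]
    simp only [List.length_cons, List.length_nil]
    rw [if_neg (by norm_num), if_neg (by norm_num)]
    have hall : (PySem.Set.ofList xs).all (fun r => PySem.List.count xs r == 2) = false := by
      rw [List.all_eq_false]
      refine ⟨a, (hmem a).mpr (Or.inl rfl), ?_⟩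
      rw [hcount a]
      simp [hne]
    rw [hall, hget]
    simp [h3]
  -- a = b ≠ c = d : two distinct, counts 2/2, both sides True
  · subst h1 h3
    have hacn : a ≠ c := (lt_of_le_of_ne hbc h2).ne
    have hd : (([a,a,c,c] : List String)).dedup = [a,c] := by
      simp [List.dedup_cons_of_mem, List.dedup_cons_of_notMem, hacn]
    rw [hd]
    simp only [List.length_cons, List.length_nil]
    rw [if_neg (by norm_num), if_neg (by norm_num)]
    have hall : (PySem.Set.ofList xs).all (fun r => PySem.List.count xs r == 2) = true := by
      rw [List.all_eq_true]
      intro r hr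
      rcases (hmem r).mp hr with h | h | h | h <;> subst h <;>
        · rw [hcount]
          simp [hacn, Ne.symm hacn]
    rw [hall, hget]
    simp
  -- a = b < c < d : three distinct, both sides False
  · subst h1
    have hac' : a < c := lt_of_le_of_ne hbc h2
    have hadn : a ≠ d := (hac'.trans_le hcd).ne
    have hd : (([a,a,c,d] : List String)).dedup = [a,c,d] := by
      simp [List.dedup_cons_of_mem, List.dedup_cons_of_notMem, hac'.ne, hadn, h3]
    rw [hd]
    simp only [List.length_cons, List.length_nil]
    rw [if_neg (by norm_num), if_pos (by norm_num), hget]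
    simp [h3]
  -- a < b = c = d : two distinct, counts 1/3, both sides False
  · subst h2 h3
    have hd : (([a,b,b,b] : List String)).dedup = [a,b] := by
      simp [List.dedup_cons_of_mem, List.dedup_cons_of_notMem, h1]
    rw [hd]
    simp only [List.length_cons, List.length_nil]
    rw [if_neg (by norm_num), if_neg (by norm_num)]
    have hall : (PySem.Set.ofList xs).all (fun r => PySem.List.count xs r == 2) = false := by
      rw [List.all_eq_false]
      refine ⟨a, (hmem a).mpr (Or.inl rfl), ?_⟩
      rw [hcount a]
      simp [Ne.symm h1]
    rw [hall, hget]
    simp [h1]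
  -- a < b = c < d : three distinct, both sides False
  · subst h2
    have hbdn : b ≠ d := (lt_of_le_of_ne hcd h3).ne
    have hadn : a ≠ d := ((lt_of_le_of_ne hab h1).trans (lt_of_le_of_ne hcd h3)).ne
    have hd : (([a,b,b,d] : List String)).dedup = [a,b,d] := by
      simp [List.dedup_cons_of_mem, List.dedup_cons_of_notMem, h1, hbdn, hadn]
    rw [hd]
    simp only [List.length_cons, List.length_nil]
    rw [if_neg (by norm_num), if_pos (by norm_num), hget]
    simp [h1]
  -- a < b < c = d : three distinct, both sides False
  · subst h3
    have hacn : a ≠ c := ((lt_of_le_of_ne hab h1).trans (lt_of_le_of_ne hbc h2)).ne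
    have hd : (([a,b,c,c] : List String)).dedup = [a,b,c] := by
      simp [List.dedup_cons_of_mem, List.dedup_cons_of_notMem, h1, h2, hacn]
    rw [hd]
    simp only [List.length_cons, List.length_nil]
    rw [if_neg (by norm_num), if_pos (by norm_num), hget]
    simp [h1]
  -- a < b < c < d : four distinct, both sides False
  · have hab' : a < b := lt_of_le_of_ne hab h1
    have hbc' : b < c := lt_of_le_of_ne hbc h2
    have hcd' : c < d := lt_of_le_of_ne hcd h3
    have hd : (([a,b,c,d] : List String)).dedup = [a,b,c,d] := by
      simp [List.dedup_cons_of_notMem, h1, h2, h3, (hab'.trans hbc').ne,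
        ((hab'.trans hbc').trans hcd').ne, (hbc'.trans hcd').ne]
    rw [hd]
    simp only [List.length_cons, List.length_nil]
    rw [if_neg (by norm_num), if_pos (by norm_num), hget]
    simp [h1]

-- ===== VERDICT (by name: the statement is the Claim_ definition above) =====
theorem isRyanpeko_spec : Claim_equal_isRyanpeko := by
  intro mentsu _ _
  unfold Spec_isRyanpeko isRyanpeko isRyanpeko_alt
  cases h : PySem.Dict.get? (PySem.Dict.mk mentsu) "shuntsu" with
  | none => rfl
  | some xs =>
    by_cases hlen : xs.length = 4
    · simp only [hlen, ne_eq, not_true_eq_false, if_false]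
      exact core_eq xs hlen
    · simp [hlen]
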